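-- pv_equiv track=rewrite | github.com/brighk/caf | dissertation/concatenate_dissertation.py | extract_preamble
-- ===== SOURCE A (Python) =====
-- def extract_preamble(main_content):
--     """Extract everything from the main file up to \\begin{document}"""
--     lines = main_content.split('\n')
--     preamble = []
--     for line in lines:
--         preamble.append(line)
--         if r'\begin{document}' in line:
--             break
--     return '\n'.join(preamble)
-- ===== SOURCE B (Python) =====
-- def extract_preamble(main_content):
--     """Extract everything from the main file up to \\begin{document}"""
--     idx = main_content.find(r'\begin{document}')
--     if idx == -1:
--         return main_content
--     end = main_content.find('\n', idx)
--     if end == -1: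
--         return main_content
--     return main_content[:end]
-- ===== Notes on version B (the rewrite author's own statement) =====
-- stated objective: simpler
-- what changed: Replaces split-into-lines + append/break loop + join with two str.find calls and one slice, never materialising a line list.
import Mathlib
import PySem

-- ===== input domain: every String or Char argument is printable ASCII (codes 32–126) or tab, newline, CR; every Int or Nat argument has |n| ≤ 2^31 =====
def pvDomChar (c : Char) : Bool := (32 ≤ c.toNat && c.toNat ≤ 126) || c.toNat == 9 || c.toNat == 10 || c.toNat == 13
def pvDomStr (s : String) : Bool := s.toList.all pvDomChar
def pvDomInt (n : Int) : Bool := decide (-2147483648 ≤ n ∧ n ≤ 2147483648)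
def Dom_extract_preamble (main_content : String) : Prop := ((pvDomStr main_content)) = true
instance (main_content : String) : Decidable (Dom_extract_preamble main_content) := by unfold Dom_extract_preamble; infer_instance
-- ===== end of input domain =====

-- B finds the marker and the following newline with str.find and returns one slice, instead of A's split-into-lines, append/break loop and join.


-- the literal r'\begin{document}' used by both Python versions
def pvMarker : List Char := "\\begin{document}".toList

-- ===== PORT A =====
-- 'for line in lines: preamble.append(line); if marker in line: break'
def pvLoopA (acc : List (List Char)) : List (List Char) → List (List Char)
  | [] => acc
  | line :: rest =>
    if PySem.Chars.isIn pvMarker line then acc ++ [line]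
    else pvLoopA (acc ++ [line]) rest

def extract_preamble (main_content : String) : String :=
  let lines := PySem.Chars.splitOn main_content.toList ['\n']   -- main_content.split('\n')
  String.ofList (PySem.Chars.join ['\n'] (pvLoopA [] lines))    -- '\n'.join(preamble)

-- ===== PORT B =====
def extract_preamble_alt (main_content : String) : String :=
  let cs := main_content.toList
  let idx := PySem.Chars.find cs pvMarker                        -- main_content.find(r'\begin{document}')
  if idx = -1 then main_content
  else
    let e := PySem.Chars.findFrom cs ['\n'] idx                  -- main_content.find('\n', idx)
    if e = -1 then main_content
    else String.ofList (PySem.List.slice cs none (some e))       -- main_content[:end]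

-- ===== PRECONDITION & SPEC =====
def Spec_extract_preamble (main_content : String) (out : String) : Prop := out = extract_preamble_alt main_content
instance (main_content : String) (out : String) : Decidable (Spec_extract_preamble main_content out) := by unfold Spec_extract_preamble; infer_instance

-- ===== CLAIM (what is proved, stated in full; the proofs are below) =====
def Claim_equal_extract_preamble : Prop := ∀ (main_content : String), Dom_extract_preamble main_content → Spec_extract_preamble main_content (extract_preamble main_content)

-- ===== LEMMAS AND PROOFS =====

-- B's body on the character list
def pvB (cs : List Char) : List Char :=
  if PySem.Chars.find cs pvMarker = -1 then cs
  else if PySem.Chars.findFrom cs ['\n'] (PySem.Chars.find cs pvMarker) = -1 then cs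
  else PySem.List.slice cs none (some (PySem.Chars.findFrom cs ['\n'] (PySem.Chars.find cs pvMarker)))

-- A's loop with the accumulator factored out
def pvTake : List (List Char) → List (List Char)
  | [] => []
  | l :: rest => if PySem.Chars.isIn pvMarker l then [l] else l :: pvTake rest

theorem pvLoopA_eq (acc : List (List Char)) (ls : List (List Char)) :
    pvLoopA acc ls = acc ++ pvTake ls := by
  induction ls generalizing acc with
  | nil => simp [pvLoopA, pvTake]
  | cons l rest ih =>
    simp only [pvLoopA, pvTake]
    split
    · simp
    · rw [ih]; simp

theorem pvAlt_eq (s : String) : extract_preamble_alt s = String.ofList (pvB s.toList) := by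
  unfold extract_preamble_alt pvB
  by_cases h1 : PySem.Chars.find s.toList pvMarker = -1
  · simp [h1, String.ofList_toList]
  · by_cases h2 : PySem.Chars.findFrom s.toList ['\n'] (PySem.Chars.find s.toList pvMarker) = -1
    · simp [h1, h2, String.ofList_toList]
    · simp [h1, h2]

-- first occurrence split of a member
theorem pvFirstSplit {c : Char} {l : List Char} (h : c ∈ l) :
    ∃ a b, l = a ++ c :: b ∧ c ∉ a := by
  induction l with
  | nil => simp at h
  | cons x xs ih =>
    by_cases hx : x = c
    · exact ⟨[], xs, by simp [hx], by simp⟩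
    · have hc : c ∈ xs := by rcases List.mem_cons.mp h with h1 | h1
                             · exact absurd h1.symm hx
                             · exact h1
      obtain ⟨a, b, rfl, hna⟩ := ih hc
      refine ⟨x :: a, b, rfl, ?_⟩
      intro hc'
      rcases List.mem_cons.mp hc' with h1 | h1
      · exact hx h1.symm
      · exact hna h1

-- splitOn.go bookkeeping
theorem pvGoAcc (sep : List Char) (fuel : Nat) (l cur : List Char) (acc : List (List Char)) :
    PySem.Chars.splitOn.go sep fuel l cur acc =
      acc.reverse ++ PySem.Chars.splitOn.go sep fuel l cur [] := by
  induction fuel generalizing l cur acc with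
  | zero => simp [PySem.Chars.splitOn.go]
  | succ n ih =>
    cases l with
    | nil => simp [PySem.Chars.splitOn.go]
    | cons c rest =>
      rw [PySem.Chars.splitOn.go, PySem.Chars.splitOn.go]
      split
      · rw [ih _ _ (cur.reverse :: acc), ih _ _ [cur.reverse]]; simp
      · rw [ih rest (c :: cur) acc, ih rest (c :: cur) []]

theorem pvGoNoNl (fuel : Nat) (l cur : List Char) (acc : List (List Char)) (h : '\n' ∉ l) :
    PySem.Chars.splitOn.go ['\n'] fuel l cur acc = ((cur.reverse ++ l) :: acc).reverse := by
  induction fuel generalizing l cur with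
  | zero => simp [PySem.Chars.splitOn.go]
  | succ n ih =>
    cases l with
    | nil => simp [PySem.Chars.splitOn.go]
    | cons c rest =>
      have hc : c ≠ '\n' := fun hc => h (by simp [hc])
      rw [PySem.Chars.splitOn.go]
      split
      · rename_i hp
        have hpre := List.isPrefixOf_iff_prefix.mp hp
        simp at hpre
        exact absurd hpre.symm hc
      · rw [ih _ _ (fun hm => h (by simp [hm]))]; simp

theorem pvGoSplit (h t cur : List Char) (acc : List (List Char)) (hh : '\n' ∉ h)
    (fuel : Nat) (hf : h.length + 1 ≤ fuel) :
    PySem.Chars.splitOn.go ['\n'] fuel (h ++ '\n' :: t) cur acc =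
      PySem.Chars.splitOn.go ['\n'] (fuel - (h.length + 1)) t [] ((cur.reverse ++ h) :: acc) := by
  induction h generalizing fuel cur with
  | nil =>
    cases fuel with
    | zero => omega
    | succ n =>
      simp only [List.nil_append]
      rw [PySem.Chars.splitOn.go]
      split
      · simp
      · rename_i hp
        exact absurd (by simp) hp
  | cons c h' ih =>
    cases fuel with
    | zero => simp at hf
    | succ n =>
      have hc : c ≠ '\n' := fun hc => hh (by simp [hc])
      simp only [List.cons_append]
      rw [PySem.Chars.splitOn.go]
      split
      · rename_i hp
        have hpre := List.isPrefixOf_iff_prefix.mp hp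
        simp at hpre
        exact absurd hpre.symm hc
      · rw [ih (c :: cur) (fun hm => hh (by simp [hm])) n (by simp at hf ⊢; omega)]
        have hfuel : n - (h'.length + 1) = n + 1 - ((c :: h').length + 1) := by
          simp only [List.length_cons] at hf ⊢
          omega
        rw [hfuel]
        simp

theorem pvSplitOnNoNl (cs : List Char) (h : '\n' ∉ cs) :
    PySem.Chars.splitOn cs ['\n'] = [cs] := by
  unfold PySem.Chars.splitOn
  rw [pvGoNoNl _ _ _ _ h]; simp

theorem pvSplitOnSplit (h t : List Char) (hh : '\n' ∉ h) :
    PySem.Chars.splitOn (h ++ '\n' :: t) ['\n'] = h :: PySem.Chars.splitOn t ['\n'] := by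
  unfold PySem.Chars.splitOn
  rw [pvGoSplit h t [] [] hh _ (by simp only [List.length_append, List.length_cons]; omega)]
  have hf : (h ++ '\n' :: t).length + 1 - (h.length + 1) = t.length + 1 := by simp
  rw [hf, pvGoAcc]
  simp

theorem pvSplitOnNeNil (cs : List Char) : PySem.Chars.splitOn cs ['\n'] ≠ [] := by
  by_cases h : '\n' ∈ cs
  · obtain ⟨a, b, rfl, hna⟩ := pvFirstSplit h
    rw [pvSplitOnSplit a b hna]; simp
  · rw [pvSplitOnNoNl cs h]; simp

theorem pvTakeNeNil (ls : List (List Char)) (h : ls ≠ []) : pvTake ls ≠ [] := by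
  cases ls with
  | nil => simp at h
  | cons l rest => simp only [pvTake]; split <;> simp

-- find points at k if k is the first occurrence
theorem pvFindEq (s sub : List Char) (k : Nat) (hk : sub <+: s.drop k)
    (hmin : ∀ i < k, ¬ sub <+: s.drop i) : PySem.Chars.find s sub = k := by
  have hin : sub <:+: s := (hk.isInfix).trans (List.drop_suffix k s).isInfix
  have h0 : 0 ≤ PySem.Chars.find s sub := (PySem.Chars.find_nonneg_iff s sub).mpr hin
  obtain ⟨h1, h2⟩ := PySem.Chars.find_spec h0
  rcases lt_trichotomy (PySem.Chars.find s sub).toNat k with hlt | heq | hgt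
  · exact absurd h1 (hmin _ hlt)
  · omega
  · exact absurd hk (h2 _ hgt)

-- a marker occurrence starting inside h cannot cross the '\n'
theorem pvNoCross {h t sub : List Char} {i : Nat} (hi : i ≤ h.length)
    (hs : '\n' ∉ sub) (hp : sub <+: (h ++ '\n' :: t).drop i) : sub <+: h.drop i := by
  have hd : (h ++ '\n' :: t).drop i = h.drop i ++ '\n' :: t :=
    List.drop_append_of_le_length hi
  rw [hd] at hp
  have htake := List.prefix_iff_eq_take.mp hp
  rw [List.take_append] at htake
  by_cases hlen : sub.length ≤ (h.drop i).length
  · have : sub.length - (h.drop i).length = 0 := by omega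
    rw [this] at htake
    simp only [List.take_zero, List.append_nil] at htake
    rw [htake]; exact List.take_prefix _ _
  · exfalso
    apply hs
    rw [htake]
    have h1 : 1 ≤ sub.length - (h.drop i).length := by omega
    have : '\n' ∈ ('\n' :: t).take (sub.length - (h.drop i).length) := by
      cases hn : sub.length - (h.drop i).length with
      | zero => omega
      | succ m => simp [List.take_succ_cons]
    exact List.mem_append_right _ this

theorem pvFindNl (h t : List Char) (hh : '\n' ∉ h) :
    PySem.Chars.find (h ++ '\n' :: t) ['\n'] = h.length := by
  apply pvFindEq
  · rw [List.drop_left]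
    exact ⟨t, rfl⟩
  · intro i hi hp
    have hd : (h ++ '\n' :: t).drop i = h.drop i ++ '\n' :: t :=
      List.drop_append_of_le_length (by omega)
    rw [hd] at hp
    obtain ⟨r, hr⟩ := hp
    cases hdrop : h.drop i with
    | nil => have := congrArg List.length hdrop; simp at this; omega
    | cons c cs' =>
      rw [hdrop] at hr
      simp at hr
      apply hh
      have hmem : c ∈ h.drop i := by rw [hdrop]; simp
      have hmem2 := List.mem_of_mem_drop hmem
      rw [hr.1]
      exact hmem2

-- prefix-of-drop inside h is an infix of h
theorem pvInfixOfDropPrefix {sub h : List Char} {i : Nat} (hp : sub <+: h.drop i) :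
    sub <:+: h := hp.isInfix.trans (List.drop_suffix i h).isInfix

theorem pvFindInHead (h t sub : List Char) (hs : '\n' ∉ sub) (hin : sub <:+: h) :
    PySem.Chars.find (h ++ '\n' :: t) sub = PySem.Chars.find h sub := by
  have h0 : 0 ≤ PySem.Chars.find h sub := (PySem.Chars.find_nonneg_iff h sub).mpr hin
  obtain ⟨h1, h2⟩ := PySem.Chars.find_spec h0
  set k := (PySem.Chars.find h sub).toNat with hk
  have hkle : k ≤ h.length := by
    have := PySem.Chars.find_le_length h sub; omega
  have : PySem.Chars.find (h ++ '\n' :: t) sub = k := by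
    apply pvFindEq
    · rw [List.drop_append_of_le_length hkle]
      exact List.prefix_append_of_prefix h1
    · intro i hilt hp
      exact h2 i hilt (pvNoCross (by omega) hs hp)
  omega

theorem pvFindInTail (h t sub : List Char) (hs : '\n' ∉ sub) (hnin : ¬ sub <:+: h) :
    PySem.Chars.find (h ++ '\n' :: t) sub =
      if PySem.Chars.find t sub = -1 then -1
      else (h.length : Int) + 1 + PySem.Chars.find t sub := by
  have hnoth : ∀ i, i ≤ h.length → ¬ sub <+: (h ++ '\n' :: t).drop i := by
    intro i hi hp
    exact hnin (pvInfixOfDropPrefix (pvNoCross hi hs hp))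
  have hdropbig : ∀ j : Nat, (h ++ '\n' :: t).drop (h.length + 1 + j) = t.drop j := by
    intro j
    have : h.length + 1 + j = h.length + (1 + j) := by omega
    rw [this, List.drop_length_add_append]
    simp [List.drop_succ_cons, Nat.add_comm 1 j]
  split
  · rename_i hneg
    rw [PySem.Chars.find_eq_neg_one_iff] at hneg ⊢
    intro hinf
    apply hneg
    obtain ⟨j, hj⟩ := (PySem.Chars.exists_prefix_drop_iff_isIn sub _).mpr
      ((PySem.Chars.isIn_iff_infix sub _).mpr hinf)
    by_cases hjle : j ≤ h.length
    · exact absurd hj (hnoth j hjle)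
    · have hj' : sub <+: t.drop (j - h.length - 1) := by
        have : j = h.length + 1 + (j - h.length - 1) := by omega
        rw [this, hdropbig] at hj
        exact hj
      exact pvInfixOfDropPrefix hj'
  · rename_i hpos
    have h0 : 0 ≤ PySem.Chars.find t sub := by
      have := PySem.Chars.neg_one_le_find t sub; omega
    obtain ⟨h1, h2⟩ := PySem.Chars.find_spec h0
    set k := (PySem.Chars.find t sub).toNat with hk
    have : PySem.Chars.find (h ++ '\n' :: t) sub = (h.length + 1 + k : Nat) := by
      apply pvFindEq
      · rw [hdropbig k]; exact h1
      · intro i hilt hp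
        by_cases hile : i ≤ h.length
        · exact hnoth i hile hp
        · have : i = h.length + 1 + (i - h.length - 1) := by omega
          rw [this, hdropbig] at hp
          exact h2 _ (by omega) hp
    rw [this]
    push_cast
    omega

-- marker facts
theorem pvMarkerNoNl : '\n' ∉ pvMarker := by decide

-- the single main induction: A's line loop equals B's find/slice on every list
theorem pvMain : ∀ (n : Nat) (cs : List Char), cs.length ≤ n →
    PySem.Chars.join ['\n'] (pvTake (PySem.Chars.splitOn cs ['\n'])) = pvB cs := by
  intro n
  induction n with
  | zero =>
    intro cs hlen
    have : cs = [] := by cases cs <;> simp_all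
    subst this
    decide
  | succ n ih =>
    intro cs hlen
    by_cases hnl : '\n' ∈ cs
    · obtain ⟨h, t, rfl, hh⟩ := pvFirstSplit hnl
      have hlt : t.length ≤ n := by simp at hlen; omega
      rw [pvSplitOnSplit h t hh]
      by_cases hm : PySem.Chars.isIn pvMarker h = true
      · -- marker is in the first line: both return h
        have hinf : pvMarker <:+: h := (PySem.Chars.isIn_iff_infix _ _).mp hm
        simp only [pvTake, hm, reduceIte]
        rw [PySem.Chars.join_singleton]
        unfold pvB
        rw [pvFindInHead h t pvMarker pvMarkerNoNl hinf]
        have h0 : 0 ≤ PySem.Chars.find h pvMarker :=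
          (PySem.Chars.find_nonneg_iff h pvMarker).mpr hinf
        set k := (PySem.Chars.find h pvMarker).toNat with hk
        have hkle : k ≤ h.length := by
          have := PySem.Chars.find_le_length h pvMarker; omega
        have hkcs : k ≤ (h ++ '\n' :: t).length := by simp; omega
        have hcast : PySem.Chars.find h pvMarker = (k : Int) := by omega
        rw [if_neg (by omega)]
        rw [hcast, PySem.Chars.findFrom_natCast _ _ k hkcs]
        rw [List.drop_append_of_le_length hkle]
        rw [pvFindNl _ _ (fun hmem => hh (List.mem_of_mem_drop hmem))]
        rw [if_neg (by omega)]
        rw [if_neg (by omega)]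
        have he : (k : Int) + ((h.drop k).length : Int) = ((h.length : Nat) : Int) := by
          simp; omega
        rw [he, PySem.List.slice_to_natCast]
        rw [List.take_left (l₂ := '\n' :: t)]
      · -- marker not in the first line: recurse on t
        have hninf : ¬ pvMarker <:+: h := by
          rw [← PySem.Chars.isIn_iff_infix]; simp [hm]
        simp only [pvTake, hm, Bool.false_eq_true, if_false]
        obtain ⟨l, ls, hpt⟩ := List.exists_cons_of_ne_nil (pvTakeNeNil _ (pvSplitOnNeNil t))
        rw [hpt, PySem.Chars.join_cons_cons, ← hpt]
        have hIH : PySem.Chars.join ['\n'] (pvTake (PySem.Chars.splitOn t ['\n'])) = pvB t :=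
          ih t hlt
        rw [hIH]
        have hdropbig : ∀ j : Nat, (h ++ '\n' :: t).drop (h.length + 1 + j) = t.drop j := by
          intro j
          have : h.length + 1 + j = h.length + (1 + j) := by omega
          rw [this, List.drop_length_add_append]
          simp [List.drop_succ_cons, Nat.add_comm 1 j]
        have hfind := pvFindInTail h t pvMarker pvMarkerNoNl hninf
        by_cases ft : PySem.Chars.find t pvMarker = -1
        · -- marker nowhere: both sides are the whole string
          rw [if_pos ft] at hfind
          conv_rhs => rw [pvB]
          rw [if_pos hfind]
          unfold pvB
          rw [if_pos ft]
          simp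
        · rw [if_neg ft] at hfind
          have h0 : 0 ≤ PySem.Chars.find t pvMarker := by
            have := PySem.Chars.neg_one_le_find t pvMarker; omega
          set k := (PySem.Chars.find t pvMarker).toNat with hk
          have hkle : k ≤ t.length := by
            have := PySem.Chars.find_le_length t pvMarker; omega
          have hcast : PySem.Chars.find t pvMarker = (k : Int) := by omega
          have hidx : PySem.Chars.find (h ++ '\n' :: t) pvMarker = ((h.length + 1 + k : Nat) : Int) := by
            rw [hfind, hcast]; push_cast; ring
          have hszcs : h.length + 1 + k ≤ (h ++ '\n' :: t).length := by simp; omega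
          conv_rhs => rw [pvB]
          rw [if_neg (by rw [hidx]; omega)]
          rw [hidx, PySem.Chars.findFrom_natCast _ _ _ hszcs, hdropbig k]
          unfold pvB
          rw [if_neg ft, hcast, PySem.Chars.findFrom_natCast _ _ _ hkle]
          by_cases fn : PySem.Chars.find (t.drop k) ['\n'] = -1
          · rw [if_pos fn, if_pos fn, if_pos rfl, if_pos rfl]
            simp
          · have m0 : 0 ≤ PySem.Chars.find (t.drop k) ['\n'] := by
              have := PySem.Chars.neg_one_le_find (t.drop k) ['\n']; omega
            set m := (PySem.Chars.find (t.drop k) ['\n']).toNat with hmeq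
            have hmcast : PySem.Chars.find (t.drop k) ['\n'] = (m : Int) := by omega
            rw [if_neg fn, if_neg fn]
            rw [if_neg (by omega), if_neg (by omega)]
            have e1 : ((h.length + 1 + k : Nat) : Int) + PySem.Chars.find (t.drop k) ['\n'] =
                ((h.length + (1 + k + m) : Nat) : Int) := by rw [hmcast]; push_cast; ring
            have e2 : (k : Int) + PySem.Chars.find (t.drop k) ['\n'] = ((k + m : Nat) : Int) := by
              rw [hmcast]; push_cast; ring
            rw [e1, e2, PySem.List.slice_to_natCast, PySem.List.slice_to_natCast]
            rw [List.take_length_add_append]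
            have : ('\n' :: t).take (1 + k + m) = '\n' :: t.take (k + m) := by
              have : 1 + k + m = (k + m) + 1 := by omega
              rw [this, List.take_succ_cons]
            rw [this]
            simp
    · -- no newline: both return cs unchanged
      rw [pvSplitOnNoNl cs hnl]
      have hjoin : PySem.Chars.join ['\n'] (pvTake [cs]) = cs := by
        simp only [pvTake]
        split <;> exact PySem.Chars.join_singleton _ _
      rw [hjoin]
      unfold pvB
      split
      · rfl
      · rename_i hne
        have h0 : 0 ≤ PySem.Chars.find cs pvMarker := by
          have := PySem.Chars.neg_one_le_find cs pvMarker; omega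
        set k := (PySem.Chars.find cs pvMarker).toNat with hk
        have hkle : k ≤ cs.length := by
          have := PySem.Chars.find_le_length cs pvMarker; omega
        have hcast : PySem.Chars.find cs pvMarker = (k : Int) := by omega
        rw [hcast, if_pos]
        rw [PySem.Chars.findFrom_natCast_eq_neg_one_iff _ _ k hkle]
        intro hinf
        exact hnl (List.mem_of_mem_drop (hinf.mem (by simp)))

-- ===== VERDICT (by name: the statement is the Claim_ definition above) =====
theorem extract_preamble_spec : Claim_equal_extract_preamble := by
  intro s _
  unfold Spec_extract_preamble
  rw [pvAlt_eq]
  simp only [extract_preamble, pvLoopA_eq, List.nil_append]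
  exact congrArg String.ofList (pvMain s.toList.length s.toList le_rfl)
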